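-- pv_equiv track=rewrite | github.com/bgoshayeshi/mathematicians_puzzle | answer.py | only_one_combination
-- ===== SOURCE A (Python) =====
-- def only_one_combination(the_list, key):
--     unique_key = {}
--     key_iter = set()
--     for pair in the_list:
--         product = pair[key]
--         if product in key_iter:
--             continue
--         if product in unique_key:
--             key_iter.add(product)
--             unique_key.pop(product)
--             continue
--         unique_key[product] = pair
--
--     return [unique_key[key] for key in unique_key]
-- ===== SOURCE B (Python) =====
-- def only_one_combination(the_list, key):
--     counts = {}
--     for pair in the_list:
--         v = pair[key]
--         counts[v] = counts.get(v, 0) + 1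
--     return [pair for pair in the_list if counts[pair[key]] == 1]
-- ===== Notes on version B (the rewrite author's own statement) =====
-- stated objective: simpler
-- what changed: Replaces A's single-pass state machine (a live candidate dict that entries are popped from, plus a seen-twice set) by a plain two-pass count-then-filter: build a frequency table of the key values, then keep the pairs whose key value occurs exactly once.
import Mathlib
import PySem

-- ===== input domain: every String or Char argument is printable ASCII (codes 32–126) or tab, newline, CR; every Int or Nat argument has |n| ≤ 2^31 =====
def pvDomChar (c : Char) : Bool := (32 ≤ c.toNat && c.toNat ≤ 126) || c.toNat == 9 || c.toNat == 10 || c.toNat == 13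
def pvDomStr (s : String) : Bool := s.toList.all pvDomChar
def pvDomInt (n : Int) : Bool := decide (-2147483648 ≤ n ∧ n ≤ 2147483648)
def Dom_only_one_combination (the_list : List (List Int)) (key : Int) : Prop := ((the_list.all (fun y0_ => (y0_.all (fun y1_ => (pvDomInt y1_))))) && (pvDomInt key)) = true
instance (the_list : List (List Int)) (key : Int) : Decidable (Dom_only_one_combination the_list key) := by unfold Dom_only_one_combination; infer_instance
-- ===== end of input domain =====

-- B replaces A's single-pass state machine (a live dict of candidates plus a set of repeated keys)
-- by a plain two-pass count-then-filter; objective: simpler.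

-- ===== PORT A =====
-- A's loop over the_list, threading the two live containers unique_key (Dict) and key_iter (Set).
def oocLoop (key : Int) : List (List Int) → PySem.Dict Int (List Int) → PySem.Set Int → PySem.Dict Int (List Int)
  | [], unique_key, _ => unique_key
  | pair :: rest, unique_key, key_iter =>
    match PySem.List.pyGet? pair key with
    | none => unique_key  -- IndexError in Python; excluded by Pre_
    | some product =>
      if PySem.Set.contains key_iter product then
        oocLoop key rest unique_key key_iter
      else if unique_key.contains product then
        oocLoop key rest (unique_key.erase product) (PySem.Set.add key_iter product)
      else
        oocLoop key rest (unique_key.insert product pair) key_iter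

def only_one_combination (the_list : List (List Int)) (key : Int) : List (List Int) :=
  let unique_key := oocLoop key the_list PySem.Dict.empty PySem.Set.empty
  -- [unique_key[key] for key in unique_key]: iterate the keys, look each up
  unique_key.keys.filterMap (fun k => unique_key.get? k)

-- ===== PORT B =====
-- B pass 1: counts[pair[key]] = counts.get(pair[key], 0) + 1 over the_list
def oocCounts (key : Int) (the_list : List (List Int)) : PySem.Dict Int Int :=
  the_list.foldl (fun counts pair =>
    match PySem.List.pyGet? pair key with
    | none => counts  -- IndexError in Python; excluded by Pre_
    | some v => counts.insert v (counts.getD v 0 + 1)) PySem.Dict.empty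

-- B pass 2: keep the pairs whose key-value was counted exactly once
def only_one_combination_alt (the_list : List (List Int)) (key : Int) : List (List Int) :=
  let counts := oocCounts key the_list
  the_list.filter (fun pair =>
    match PySem.List.pyGet? pair key with
    | none => false  -- IndexError in Python; excluded by Pre_
    | some v => counts.getD v 0 == 1)

-- ===== PRECONDITION & SPEC =====
-- pair[key] must be a valid (possibly negative) Python index into every pair, else A raises IndexError.
def Pre_only_one_combination (the_list : List (List Int)) (key : Int) : Prop :=
  ∀ pair ∈ the_list, PySem.Raise.InRange pair.length key
instance (the_list : List (List Int)) (key : Int) : Decidable (Pre_only_one_combination the_list key) := by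
  unfold Pre_only_one_combination; infer_instance

def pvWitness_only_one_combination : List (List Int) × Int := ([[1, 10], [2, 20], [1, 30]], 0)

def Spec_only_one_combination (the_list : List (List Int)) (key : Int) (out : List (List Int)) : Prop := out = only_one_combination_alt the_list key
instance (the_list : List (List Int)) (key : Int) (out : List (List Int)) : Decidable (Spec_only_one_combination the_list key out) := by unfold Spec_only_one_combination; infer_instance

-- ===== CLAIM (what is proved, stated in full; the proofs are below) =====
def Claim_equal_only_one_combination : Prop := ∀ (the_list : List (List Int)) (key : Int), Dom_only_one_combination the_list key → Pre_only_one_combination the_list key → Spec_only_one_combination the_list key (only_one_combination the_list key)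

-- ===== LEMMAS AND PROOFS =====

-- the key value of a pair (well-defined under Pre_)
def getk (key : Int) (pair : List Int) : Int := (PySem.List.pyGet? pair key).getD 0

lemma getk_of_some {key : Int} {pair : List Int} {v : Int}
    (h : PySem.List.pyGet? pair key = some v) : getk key pair = v := by
  simp [getk, h]

-- B's counts dict counts the key values
lemma counts_getD (key : Int) (l : List (List Int)) (d : PySem.Dict Int Int) (v : Int)
    (hpre : ∀ p ∈ l, (PySem.List.pyGet? p key).isSome) :
    (l.foldl (fun counts pair =>
      match PySem.List.pyGet? pair key with
      | none => counts
      | some w => counts.insert w (counts.getD w 0 + 1)) d).getD v 0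
    = d.getD v 0 + ((l.map (getk key)).count v : Int) := by
  induction l generalizing d with
  | nil => simp
  | cons p rest ih =>
    have hp : (PySem.List.pyGet? p key).isSome := hpre p (by simp)
    obtain ⟨w, hw⟩ := Option.isSome_iff_exists.mp hp
    have hrest : ∀ q ∈ rest, (PySem.List.pyGet? q key).isSome :=
      fun q hq => hpre q (by simp [hq])
    simp only [List.foldl_cons, hw]
    rw [ih _ hrest, PySem.Dict.getD_insert]
    simp only [List.map_cons, getk_of_some hw, List.count_cons, beq_iff_eq]
    rcases eq_or_ne v w with h | h
    · subst h
      simp only [if_pos rfl]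
      push_cast; ring
    · rw [if_neg h, if_neg (fun hh => h hh.symm)]
      push_cast; ring

-- B is the count-is-one filter
lemma alt_eq_filter (the_list : List (List Int)) (key : Int)
    (hpre : ∀ p ∈ the_list, (PySem.List.pyGet? p key).isSome) :
    only_one_combination_alt the_list key
    = the_list.filter (fun p => (the_list.map (getk key)).count (getk key p) == 1) := by
  unfold only_one_combination_alt oocCounts
  apply List.filter_congr
  intro p hp
  obtain ⟨v, hv⟩ := Option.isSome_iff_exists.mp (hpre p hp)
  simp only [hv]
  rw [counts_getD key the_list PySem.Dict.empty v hpre]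
  rw [getk_of_some hv]
  simp only [PySem.Dict.getD_empty, zero_add]
  rcases eq_or_ne ((the_list.map (getk key)).count v) 1 with h | h
  · rw [h]; simp
  · have h1 : ((the_list.map (getk key)).count v : Int) ≠ 1 := by exact_mod_cast h
    simp [h, h1]

-- the final comprehension over a dict with distinct keys returns its values
lemma filterMap_get?_eq_values (l : List (Int × List Int)) (hnd : (l.map (·.1)).Nodup) :
    (l.map (·.1)).filterMap (fun k => (PySem.Dict.mk l).get? k) = l.map (·.2) := by
  induction l with
  | nil => simp
  | cons kv rest ih =>
    obtain ⟨k0, v0⟩ := kv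
    simp only [List.map_cons, List.filterMap_cons, PySem.Dict.get?_mk_cons]
    simp only [List.map_cons, List.nodup_cons] at hnd
    rw [if_pos (by simp)]
    have : (rest.map (·.1)).filterMap
        (fun k => if (k0 == k) = true then some v0 else (PySem.Dict.mk rest).get? k)
        = (rest.map (·.1)).filterMap (fun k => (PySem.Dict.mk rest).get? k) := by
      apply List.filterMap_congr
      intro k hk
      have : k0 ≠ k := fun h => hnd.1 (h ▸ hk)
      simp [this]
    rw [this, ih hnd.2]

-- the main loop invariant for A: the surviving dict values are the old entries whose key
-- never recurs, followed by the fresh pairs whose key occurs exactly once in the rest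
lemma loopA_values (key : Int) (rest : List (List Int)) :
    ∀ (d : PySem.Dict Int (List Int)) (s : PySem.Set Int),
    (∀ p ∈ rest, (PySem.List.pyGet? p key).isSome) →
    d.keys.Nodup →
    (∀ k ∈ d.keys, k ∉ s) →
    (oocLoop key rest d s).values =
      (d.items.filter (fun kv => (rest.map (getk key)).count kv.1 == 0)).map (·.2)
      ++ rest.filter (fun p => !s.contains (getk key p) && !d.contains (getk key p)
            && ((rest.map (getk key)).count (getk key p) == 1)) := by
  induction rest with
  | nil =>
    intro d s _ _ _
    simp [oocLoop, PySem.Dict.values]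
  | cons p tl ih =>
    intro d s hpre hnd hdisj
    have hp : (PySem.List.pyGet? p key).isSome := hpre p (by simp)
    obtain ⟨v, hv⟩ := Option.isSome_iff_exists.mp hp
    have hgp : getk key p = v := getk_of_some hv
    have htl : ∀ q ∈ tl, (PySem.List.pyGet? q key).isSome := fun q hq => hpre q (by simp [hq])
    simp only [oocLoop, hv]
    by_cases hs : v ∈ s
    · -- v already known repeated: skip
      rw [if_pos ((PySem.Set.contains_iff s v).mpr hs)]
      rw [ih d s htl hnd hdisj]
      congr 1
      · -- d-part: no key of d equals v (keys disjoint from s)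
        apply congrArg
        apply List.filter_congr
        intro kv hkv
        have hk : kv.1 ∈ d.keys := by
          simp [PySem.Dict.keys]; exact ⟨kv.2, by simpa using hkv⟩
        have : kv.1 ≠ v := fun h => hdisj kv.1 hk (h ▸ hs)
        simp only [List.map_cons, hgp, List.count_cons_of_ne (Ne.symm this)]
      · -- rest-part: p is dropped (v ∈ s), tl predicate unchanged
        rw [List.filter_cons]
        rw [if_neg (by simp [hgp, hs, PySem.Set.contains_iff])]
        apply List.filter_congr
        intro q hq
        by_cases hqv : getk key q = v
        · simp [hqv, hs, PySem.Set.contains_iff]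
        · simp only [List.map_cons, hgp, List.count_cons_of_ne (Ne.symm hqv)]
    · rw [if_neg (by simp [PySem.Set.contains_iff s v] at *; exact hs)]
      by_cases hd : v ∈ d.keys
      · -- second occurrence: move v from the dict to the dead set
        rw [if_pos (by rw [PySem.Dict.contains_eq_decide_mem_keys]; simp [hd])]
        have hnd' : (d.erase v).keys.Nodup := by
          simp only [PySem.Dict.keys, PySem.Dict.erase]
          exact List.Nodup.sublist ((List.filter_sublist.map _)) hnd
        have hdisj' : ∀ k ∈ (d.erase v).keys, k ∉ PySem.Set.add s v := by
          intro k hk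
          simp only [PySem.Dict.keys, PySem.Dict.erase, List.mem_map] at hk
          obtain ⟨kv, hkv, hkeq⟩ := hk
          simp only [List.mem_filter] at hkv
          have hk1 : k ≠ v := by
            intro h; subst hkeq; simp [h] at hkv
          rw [PySem.Set.mem_add]
          push Not
          refine ⟨?_, hk1⟩
          apply hdisj
          subst hkeq
          simp [PySem.Dict.keys]
          exact ⟨kv.2, by simpa using hkv.1⟩
        rw [ih (d.erase v) (PySem.Set.add s v) htl hnd' hdisj']
        congr 1
        · -- d-part: erase v then count-in-tl = count-in-(p::tl) on d
          apply congrArg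
          simp only [PySem.Dict.erase, List.filter_filter]
          apply List.filter_congr
          intro kv hkv
          by_cases hkv1 : kv.1 = v
          · simp [hkv1, List.count_cons, hgp]
          · simp only [List.map_cons, hgp, List.count_cons_of_ne (Ne.symm hkv1)]
            simp [hkv1]
        · -- rest-part
          rw [List.filter_cons]
          rw [if_neg (by simp [hgp, PySem.Dict.contains_eq_decide_mem_keys, hd])]
          apply List.filter_congr
          intro q hq
          by_cases hqv : getk key q = v
          · have hvin : v ∈ PySem.Set.add s v := by rw [PySem.Set.mem_add]; right; rfl
            simp [hqv, hvin, PySem.Set.contains_iff, PySem.Dict.contains_eq_decide_mem_keys, hd]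
          · have h1 : PySem.Set.contains (PySem.Set.add s v) (getk key q)
                = PySem.Set.contains s (getk key q) := by
              rcases h : PySem.Set.contains s (getk key q) with _ | _
              · rw [Bool.eq_false_iff]
                intro hc
                rw [PySem.Set.contains_iff, PySem.Set.mem_add] at hc
                rcases hc with hc | hc
                · rw [Bool.eq_false_iff] at h; exact h ((PySem.Set.contains_iff s _).mpr hc)
                · exact hqv hc
              · rw [PySem.Set.contains_iff] at h ⊢
                rw [PySem.Set.mem_add]; left; exact h
            have h2 : (d.erase v).contains (getk key q) = d.contains (getk key q) := by
              rw [PySem.Dict.contains_eq_decide_mem_keys, PySem.Dict.contains_eq_decide_mem_keys]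
              rw [decide_eq_decide]
              simp only [PySem.Dict.erase, PySem.Dict.keys, List.mem_map]
              constructor
              · rintro ⟨kv, hkv, he⟩
                exact ⟨kv, (List.mem_filter.mp hkv).1, he⟩
              · rintro ⟨kv, hkv, he⟩
                refine ⟨kv, List.mem_filter.mpr ⟨hkv, ?_⟩, he⟩
                have : kv.1 ≠ v := by rw [he]; exact hqv
                simpa using this
            rw [h1, h2]
            simp only [List.map_cons, hgp, List.count_cons_of_ne (Ne.symm hqv)]
      · -- first occurrence of v: insert it as a candidate
        rw [if_neg (by rw [PySem.Dict.contains_eq_decide_mem_keys]; simp [hd])]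
        have hnc : d.contains v = false := by
          rw [PySem.Dict.contains_eq_decide_mem_keys]; simp [hd]
        have hnd' : (d.insert v p).keys.Nodup := by
          rw [PySem.Dict.keys_insert_of_not_contains _ _ hnc]
          exact List.Nodup.append hnd (by simp) (by
            intro a ha hb; simp at hb; subst hb; exact hd ha)
        have hdisj' : ∀ k ∈ (d.insert v p).keys, k ∉ s := by
          intro k hk
          rw [PySem.Dict.keys_insert_of_not_contains _ _ hnc] at hk
          simp at hk
          rcases hk with hk | hk
          · exact hdisj k hk
          · subst hk; exact hs
        rw [ih (d.insert v p) s htl hnd' hdisj']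
        rw [PySem.Dict.items_insert_of_not_contains _ _ hnc]
        rw [List.filter_append, List.map_append]
        rw [List.append_assoc]
        congr 1
        · -- old d entries: counts agree (their keys differ from v)
          apply congrArg
          apply List.filter_congr
          intro kv hkv
          have hk : kv.1 ∈ d.keys := by
            simp [PySem.Dict.keys]; exact ⟨kv.2, by simpa using hkv⟩
          have : kv.1 ≠ v := fun h => hd (h ▸ hk)
          simp only [List.map_cons, hgp, List.count_cons_of_ne (Ne.symm this)]
        · -- the new entry (v, p) vs p's place at the head of the filtered rest
          by_cases h0 : (tl.map (getk key)).count v = 0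
          · -- v unique overall: (v,p) survives on the left, p is kept on the right
            have hnp : ∀ q ∈ tl, getk key q ≠ v := by
              intro q hq hc
              have : v ∈ tl.map (getk key) := by simp; exact ⟨q, hq, hc⟩
              rw [← List.count_pos_iff] at this
              omega
            rw [List.filter_cons, if_pos (by simp [h0])]
            simp only [List.filter_nil, List.map_cons, List.map_nil, List.singleton_append]
            rw [List.filter_cons, if_pos (by
              simp [hgp, hnc, PySem.Set.contains_iff, hs, List.count_cons, h0])]
            congr 1
            apply List.filter_congr
            intro q hq
            have hqv := hnp q hq
            have hcontains : (d.insert v p).contains (getk key q) = d.contains (getk key q) := by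
              rw [PySem.Dict.contains_eq_decide_mem_keys, PySem.Dict.contains_eq_decide_mem_keys]
              rw [PySem.Dict.keys_insert_of_not_contains _ _ hnc]
              simp [hqv]
            rw [hcontains]
            simp only [List.map_cons, hgp, List.count_cons_of_ne (Ne.symm hqv)]
          · -- v repeats later: (v,p) will be filtered out on both sides
            rw [List.filter_cons, if_neg (by simp [h0])]
            simp only [List.filter_nil, List.map_nil, List.nil_append]
            rw [List.filter_cons, if_neg (by
              simp only [List.map_cons, hgp, List.count_cons_self]
              simp
              intro _ _
              omega)]
            apply List.filter_congr
            intro q hq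
            by_cases hqv : getk key q = v
            · have hcont : (d.insert v p).contains v = true := by
                rw [PySem.Dict.contains_eq_decide_mem_keys]
                rw [PySem.Dict.keys_insert_of_not_contains _ _ hnc]
                simp
              have hc1 : (List.count v (getk key p :: List.map (getk key) tl) == 1) = false := by
                rw [hgp, List.count_cons_self]
                simp
                omega
              simp [hqv, hcont, hc1]
            · have hcontains : (d.insert v p).contains (getk key q) = d.contains (getk key q) := by
                rw [PySem.Dict.contains_eq_decide_mem_keys, PySem.Dict.contains_eq_decide_mem_keys]
                rw [PySem.Dict.keys_insert_of_not_contains _ _ hnc]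
                simp [hqv]
              rw [hcontains]
              simp only [List.map_cons, hgp, List.count_cons_of_ne (Ne.symm hqv)]

-- keys of the loop result stay distinct (needed to read the final comprehension as "values")
lemma loopA_nodup_keys (key : Int) (rest : List (List Int)) :
    ∀ (d : PySem.Dict Int (List Int)) (s : PySem.Set Int), d.keys.Nodup →
    (oocLoop key rest d s).keys.Nodup := by
  induction rest with
  | nil => intro d s hnd; simpa [oocLoop]
  | cons p tl ih =>
    intro d s hnd
    cases hv : PySem.List.pyGet? p key with
    | none => simpa [oocLoop, hv]
    | some v =>
      simp only [oocLoop, hv]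
      by_cases h1 : PySem.Set.contains s v
      · rw [if_pos h1]; exact ih d s hnd
      · rw [if_neg h1]
        by_cases h2 : d.contains v
        · rw [if_pos h2]
          apply ih
          simp only [PySem.Dict.keys, PySem.Dict.erase]
          exact List.Nodup.sublist ((List.filter_sublist.map _)) hnd
        · rw [if_neg (by simp [h2])]
          apply ih
          rw [PySem.Dict.keys_insert_of_not_contains _ _ (by simpa using h2)]
          apply List.Nodup.append hnd (by simp)
          intro a ha hb; simp at hb; subst hb
          rw [PySem.Dict.contains_eq_decide_mem_keys] at h2
          simp at h2; exact h2 ha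

-- ===== VERDICT (by name: the statement is the Claim_ definition above) =====
theorem only_one_combination_spec : Claim_equal_only_one_combination := by
  intro the_list key _ hpre
  unfold Spec_only_one_combination
  have hsome : ∀ p ∈ the_list, (PySem.List.pyGet? p key).isSome := by
    intro p hp
    rcases h : PySem.List.pyGet? p key with _ | v
    · exact absurd ((PySem.List.pyGet?_eq_none_iff _ _).mp h) (by simp; exact hpre p hp)
    · simp
  unfold only_one_combination
  have hnd : (oocLoop key the_list PySem.Dict.empty PySem.Set.empty).keys.Nodup :=
    loopA_nodup_keys key the_list PySem.Dict.empty PySem.Set.empty (by simp [PySem.Dict.keys, PySem.Dict.empty])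
  -- the comprehension reads off the values
  rw [show (oocLoop key the_list PySem.Dict.empty PySem.Set.empty).keys.filterMap
        (fun k => (oocLoop key the_list PySem.Dict.empty PySem.Set.empty).get? k)
      = (oocLoop key the_list PySem.Dict.empty PySem.Set.empty).values from by
    cases h : oocLoop key the_list PySem.Dict.empty PySem.Set.empty with
    | mk l =>
      have := filterMap_get?_eq_values l (by rw [h] at hnd; exact hnd)
      simpa [PySem.Dict.keys, PySem.Dict.values] using this]
  rw [loopA_values key the_list PySem.Dict.empty PySem.Set.empty hsome
      (by simp [PySem.Dict.keys, PySem.Dict.empty])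
      (by simp [PySem.Dict.keys, PySem.Dict.empty])]
  rw [alt_eq_filter the_list key hsome]
  simp only [PySem.Dict.empty, List.filter_nil, List.map_nil, List.nil_append]
  apply List.filter_congr
  intro p _
  simp [PySem.Dict.contains_empty, PySem.Set.contains]
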